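-- pv_equiv track=rewrite | github.com/ramelloperalta/Python-coursework | labs109c.py | create_zigzag
-- ===== SOURCE A (Python) =====
-- def create_zigzag(rows, cols, start = 1):
--     li = []
--     n = start
--     for r in range(rows):
--         li.append(list(range(n, n+cols)))
--         n += cols
--     for r in range(1,rows,2):
--         li[r].reverse()
--     return li
-- ===== SOURCE B (Python) =====
-- def create_zigzag(rows, cols, start = 1):
--     # Each cell is computed independently by a closed-form index formula:
--     # row r, column c holds start + r*cols + (c on even rows, cols-1-c on odd rows).
--     return [[start + r * cols + (c if r % 2 == 0 else cols - 1 - c)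
--              for c in range(cols)]
--             for r in range(rows)]
-- ===== Notes on version B (the rewrite author's own statement) =====
-- stated objective: alternative
-- what changed: B computes every cell independently from its (row, column) index by the closed-form formula start + r*cols + (c or cols-1-c), a pure nested comprehension with no running counter, no consecutive-range construction and no reversal pass, instead of A's two-phase build-ascending-rows-then-reverse-odd-rows algorithm.
import Mathlib
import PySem

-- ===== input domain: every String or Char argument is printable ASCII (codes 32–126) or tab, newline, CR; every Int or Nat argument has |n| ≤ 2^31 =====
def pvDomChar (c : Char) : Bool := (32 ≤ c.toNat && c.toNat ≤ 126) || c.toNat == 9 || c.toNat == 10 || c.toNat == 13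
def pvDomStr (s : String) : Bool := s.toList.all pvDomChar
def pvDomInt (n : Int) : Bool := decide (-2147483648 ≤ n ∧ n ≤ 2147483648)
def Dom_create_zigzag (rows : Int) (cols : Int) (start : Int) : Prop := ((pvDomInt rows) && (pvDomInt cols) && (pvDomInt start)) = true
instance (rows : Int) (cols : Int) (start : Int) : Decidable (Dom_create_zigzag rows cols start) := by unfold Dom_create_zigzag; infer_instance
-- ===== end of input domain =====

-- B computes every cell independently from its (row, column) index by a closed-form formula
-- (a pure nested comprehension), instead of A's build-ascending-rows-then-reverse-odd-rows two-phase algorithm.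

-- ===== PORT A =====
-- first loop: li.append(list(range(n, n+cols))); n += cols
-- second loop: for r in range(1, rows, 2): li[r].reverse()  — r is always a valid index
-- (1 ≤ r < rows = len(li)), so pyGetD/pySetD are exact here.
def create_zigzag (rows : Int) (cols : Int) (start : Int) : List (List Int) :=
  let st := (PySem.List.pyRange 0 rows 1).foldl
    (fun (st : List (List Int) × Int) _ =>
      (st.1 ++ [PySem.List.pyRange st.2 (st.2 + cols) 1], st.2 + cols))
    ([], start)
  (PySem.List.pyRange 1 rows 2).foldl
    (fun li r => PySem.List.pySetD li r ((PySem.List.pyGetD li r []).reverse)) st.1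

-- ===== PORT B =====
-- nested comprehension: cell (r, c) = start + r*cols + (c if r even else cols-1-c)
def create_zigzag_alt (rows : Int) (cols : Int) (start : Int) : List (List Int) :=
  (PySem.List.pyRange 0 rows 1).map (fun r =>
    (PySem.List.pyRange 0 cols 1).map (fun c =>
      start + r * cols + (if r % 2 == 0 then c else cols - 1 - c)))

-- ===== PRECONDITION & SPEC =====
def Spec_create_zigzag (rows : Int) (cols : Int) (start : Int) (out : List (List Int)) : Prop := out = create_zigzag_alt rows cols start
instance (rows : Int) (cols : Int) (start : Int) (out : List (List Int)) : Decidable (Spec_create_zigzag rows cols start out) := by unfold Spec_create_zigzag; infer_instance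

-- ===== CLAIM (what is proved, stated in full; the proofs are below) =====
def Claim_equal_create_zigzag : Prop := ∀ (rows : Int) (cols : Int) (start : Int), Dom_create_zigzag rows cols start → Spec_create_zigzag rows cols start (create_zigzag rows cols start)

-- ===== LEMMAS AND PROOFS =====

-- ascending row k
def pvAsc (cols start : Int) (k : Nat) : List Int :=
  PySem.List.pyRange (start + k * cols) (start + k * cols + cols) 1

-- the final zigzag row k
def pvZig (cols start : Int) (k : Nat) : List Int :=
  if k % 2 = 0 then pvAsc cols start k else (pvAsc cols start k).reverse

lemma pvB_eq (rows cols start : Int) :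
    create_zigzag_alt rows cols start = (List.range rows.toNat).map (pvZig cols start) := by
  unfold create_zigzag_alt
  rw [PySem.List.pyRange_one 0 rows, List.map_map]
  simp only [Int.sub_zero]
  refine List.map_congr_left ?_
  intro k _
  simp only [Function.comp, zero_add]
  by_cases hk : k % 2 = 0
  · have hki : ((k : Int)) % 2 = 0 := by omega
    simp only [pvZig, hk, if_true, pvAsc, hki, beq_self_eq_true, if_true]
    rw [PySem.List.pyRange_one 0 cols, List.map_map,
        PySem.List.pyRange_one (start + (k : Int) * cols)]
    have hlen : (start + (k : Int) * cols + cols - (start + (k : Int) * cols)).toNat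
        = (cols - 0).toNat := by omega
    rw [hlen]
    refine List.map_congr_left ?_
    intro c _
    simp only [Function.comp, zero_add]
  · have hki : ¬ ((k : Int)) % 2 = 0 := by omega
    have hif : (((k : Int)) % 2 == 0) = false := by simpa using hki
    simp only [pvZig, hk, if_false, pvAsc, hif, Bool.false_eq_true]
    have h1 : (PySem.List.pyRange 0 cols 1).map
          (fun c => start + (k : Int) * cols + (cols - 1 - c))
        = PySem.List.pyRange (start + (k : Int) * cols + cols - 1)
            (start + (k : Int) * cols - 1) (-1) := by
      rw [PySem.List.pyRange_one 0 cols, List.map_map, PySem.List.pyRange_neg_one]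
      have hlen : (start + (k : Int) * cols + cols - 1 - (start + (k : Int) * cols - 1)).toNat
          = (cols - 0).toNat := by omega
      rw [hlen]
      refine List.map_congr_left ?_
      intro c _
      simp only [Function.comp]
      ring
    rw [h1, PySem.List.pyRange_neg_one_eq_reverse,
        show start + (k : Int) * cols - 1 + 1 = start + (k : Int) * cols from by ring,
        show start + (k : Int) * cols + cols - 1 + 1 = start + (k : Int) * cols + cols from by ring]

lemma pv_fold1 (cols : Int) :
    ∀ (xs : List Int) (acc : List (List Int)) (s : Int),
      xs.foldl (fun (st : List (List Int) × Int) _ =>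
          (st.1 ++ [PySem.List.pyRange st.2 (st.2 + cols) 1], st.2 + cols)) (acc, s)
      = (acc ++ (List.range xs.length).map (fun (k : Nat) => PySem.List.pyRange (s + (k : Int) * cols) (s + (k : Int) * cols + cols) 1),
         s + (xs.length : Int) * cols) := by
  intro xs
  induction xs with
  | nil => intro acc s; simp
  | cons x xs ih =>
    intro acc s
    rw [List.foldl_cons, ih]
    simp only [List.length_cons, List.range_succ_eq_map, List.map_cons, List.map_map,
      Prod.mk.injEq]
    refine ⟨?_, by push_cast; ring⟩
    simp only [List.append_assoc, List.singleton_append]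
    congr 1
    congr 1
    · norm_num
    · refine List.map_congr_left ?_
      intro a _
      simp only [Function.comp_apply, Nat.succ_eq_add_one]
      push_cast
      ring_nf

lemma pv_set_map {α : Type} (f : Nat → α) (N i : Nat) (v : α) (hi : i < N) :
    ((List.range N).map f).set i v = (List.range N).map (fun k => if k = i then v else f k) := by
  apply List.ext_getElem
  · simp
  · intro n h1 h2
    simp only [List.getElem_set, List.getElem_map, List.getElem_range]
    by_cases hn : n = i
    · subst hn; simp
    · rw [if_neg (fun h => hn h.symm), if_neg hn]

lemma pv_fold2 (cols start : Int) (N : Nat) :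
    ∀ (M : Nat), 2 * M ≤ N →
      ((List.range M).map (fun (j : Nat) => (1 : Int) + 2 * (j : Int))).foldl
        (fun li r => PySem.List.pySetD li r ((PySem.List.pyGetD li r []).reverse))
        ((List.range N).map (pvAsc cols start))
      = (List.range N).map (fun k => if k % 2 = 1 ∧ k < 2 * M then (pvAsc cols start k).reverse
                                     else pvAsc cols start k) := by
  intro M
  induction M with
  | zero =>
    intro _
    simp only [List.range_zero, List.map_nil, List.foldl_nil]
    refine List.map_congr_left ?_
    intro k _; simp
  | succ M ih =>
    intro hM
    have hM' : 2 * M ≤ N := by omega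
    have hidx : 1 + 2 * M < N := by omega
    rw [List.range_succ, List.map_append, List.foldl_append, ih hM']
    simp only [List.map_cons, List.map_nil, List.foldl_cons, List.foldl_nil]
    have hcast : ((1 : Int) + 2 * (M : Int)) = ((1 + 2 * M : Nat) : Int) := by push_cast; ring
    rw [hcast, PySem.List.pySetD_natCast]
    have hget : PySem.List.pyGetD ((List.range N).map
        (fun k => if k % 2 = 1 ∧ k < 2 * M then (pvAsc cols start k).reverse else pvAsc cols start k))
        ((1 + 2 * M : Nat) : Int) [] = pvAsc cols start (1 + 2 * M) := by
      rw [PySem.List.pyGetD_natCast]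
      rw [List.getD_eq_getElem _ _ (by simpa using hidx)]
      simp only [List.getElem_map, List.getElem_range]
      have : ¬ (1 + 2 * M < 2 * M) := by omega
      simp [this]
    rw [hget, pv_set_map _ _ _ _ hidx]
    refine List.map_congr_left ?_
    intro k hk
    simp only [List.mem_range] at hk
    by_cases hke : k = 1 + 2 * M
    · subst hke
      have h1 : (1 + 2 * M) % 2 = 1 ∧ 1 + 2 * M < 2 * (M + 1) := by omega
      simp [h1]
    · have : (k % 2 = 1 ∧ k < 2 * (M + 1)) ↔ (k % 2 = 1 ∧ k < 2 * M) := by omega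
      simp [hke, this]

lemma pvA_eq (rows cols start : Int) :
    create_zigzag rows cols start = (List.range rows.toNat).map (pvZig cols start) := by
  unfold create_zigzag
  rw [pv_fold1]
  simp only [PySem.List.length_pyRange_one, List.nil_append]
  set N : Nat := (rows - 0).toNat with hN
  have hNr : rows.toNat = N := by omega
  have hasc : (List.range N).map
      (fun (k : Nat) => PySem.List.pyRange (start + (k : Int) * cols) (start + (k : Int) * cols + cols) 1)
      = (List.range N).map (pvAsc cols start) := rfl
  rw [hasc, hNr]
  by_cases hrows : 1 < rows
  · rw [PySem.List.pyRange_of_pos 1 rows (by norm_num)]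
    rw [if_pos hrows]
    set M : Nat := ((rows - 1 + 2 - 1) / 2).toNat with hM
    have hMN : 2 * M ≤ N := by omega
    have hmap : (List.range M).map (fun (k : Nat) => (1 : Int) + 2 * ((k : Nat) : Int))
        = (List.range M).map (fun (j : Nat) => (1 : Int) + 2 * (j : Int)) := rfl
    rw [hmap, pv_fold2 cols start N M hMN]
    refine List.map_congr_left ?_
    intro k hk
    simp only [List.mem_range] at hk
    unfold pvZig
    by_cases hke : k % 2 = 0
    · have : ¬ (k % 2 = 1 ∧ k < 2 * M) := by omega
      simp [hke]
    · have hlt : k < 2 * M := by omega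
      have h2 : k % 2 = 1 ∧ k < 2 * M := ⟨by omega, hlt⟩
      simp [h2]
  · have hnil : PySem.List.pyRange 1 rows 2 = [] := by
      rw [PySem.List.pyRange_of_pos 1 rows (by norm_num)]
      rw [if_neg (by omega)]
      simp
    rw [hnil]
    simp only [List.foldl_nil]
    refine List.map_congr_left ?_
    intro k hk
    simp only [List.mem_range] at hk
    have : k % 2 = 0 := by omega
    simp [pvZig, this]

-- ===== VERDICT (by name: the statement is the Claim_ definition above) =====
theorem create_zigzag_spec : Claim_equal_create_zigzag := by
  intro rows cols start _
  unfold Spec_create_zigzag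
  rw [pvA_eq, pvB_eq]
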